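-- pv_equiv track=rewrite | github.com/ChloeW125/codeSignalLearning | MasteringPythonSets - IntersectionNon-RepeatingElementsAndUniqueElements/1.3.py | exclusive_products
-- ===== SOURCE A (Python) =====
-- def exclusive_products(inventory1, inventory2):
--     #Sets for each inventory list
--     set1 = set() #For inventory1
--     set2 = set() #For inventory2
--
--     #Go through the terms in each list and convert them all to uppercase. Then append them each to a set
--     for i in inventory1:
--         set1.add(i.upper())
--
--     for j in inventory2:
--         set2.add(j.upper())
--
--     #Find the items exclusive to each set and add them to another set
--     exclusive1 = set() #For inventory1
--     exclusive2 = set() #Foer inventory2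
--
--     exclusive1 = set1 - set2
--     exclusive2 = set2 - set1
--
--     #Return the exclusive sets in appropriate order
--     return (sorted(exclusive1), sorted(exclusive2))
-- ===== SOURCE B (Python) =====
-- def exclusive_products(inventory1, inventory2):
--     # Sort-and-merge: no sets/hashing. Uppercase and sort each list, collapse
--     # adjacent duplicates, then one two-pointer merge emits each side's
--     # exclusive items already in sorted order.
--     a = _dedup_sorted(sorted(i.upper() for i in inventory1))
--     b = _dedup_sorted(sorted(j.upper() for j in inventory2))
--     only1, only2 = [], []
--     i = j = 0
--     while i < len(a) and j < len(b):
--         if a[i] < b[j]: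
--             only1.append(a[i])
--             i += 1
--         elif b[j] < a[i]:
--             only2.append(b[j])
--             j += 1
--         else:
--             i += 1
--             j += 1
--     return (only1 + a[i:], only2 + b[j:])
--
--
-- def _dedup_sorted(xs):
--     out = []
--     for x in xs:
--         if not out or out[-1] != x:
--             out.append(x)
--     return out
-- ===== Notes on version B (the rewrite author's own statement) =====
-- stated objective: alternative
-- what changed: Replaced the hash-set construction and set differences by sort-then-merge: uppercase, sort and adjacent-dedup each list, then a single two-pointer merge over the two sorted lists emits each side's exclusive items already in order, so no sets and no final sort on the differences.
import Mathlib
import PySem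

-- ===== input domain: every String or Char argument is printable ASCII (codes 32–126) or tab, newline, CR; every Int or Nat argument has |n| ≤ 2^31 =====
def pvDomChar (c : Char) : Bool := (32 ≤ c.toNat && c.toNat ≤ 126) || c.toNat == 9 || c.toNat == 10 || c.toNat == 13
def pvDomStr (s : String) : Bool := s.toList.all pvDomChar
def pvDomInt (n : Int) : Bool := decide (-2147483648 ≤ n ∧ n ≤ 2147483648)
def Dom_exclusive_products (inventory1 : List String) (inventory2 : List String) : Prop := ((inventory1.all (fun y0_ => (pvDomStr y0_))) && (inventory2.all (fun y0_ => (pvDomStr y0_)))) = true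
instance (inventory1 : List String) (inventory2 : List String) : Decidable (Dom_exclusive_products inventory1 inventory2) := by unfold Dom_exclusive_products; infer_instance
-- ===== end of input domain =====

-- B replaces A's hash-sets and set differences by sort-then-merge: uppercase, sort and
-- adjacent-dedup each list, then a two-pointer merge emits each side's exclusives in order.

-- ===== PORT A =====
def exclusive_products (inventory1 : List String) (inventory2 : List String) : List String × List String :=
  let set1 : PySem.Set String := PySem.Set.empty
  let set2 : PySem.Set String := PySem.Set.empty
  let set1 := inventory1.foldl (fun s i => PySem.Set.add s (PySem.Str.upper i)) set1
  let set2 := inventory2.foldl (fun s j => PySem.Set.add s (PySem.Str.upper j)) set2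
  let exclusive1 := PySem.Set.diff set1 set2
  let exclusive2 := PySem.Set.diff set2 set1
  (PySem.List.sorted exclusive1 (fun x => x) false, PySem.List.sorted exclusive2 (fun x => x) false)

-- ===== PORT B =====
-- _dedup_sorted: fold over xs appending x unless it equals the last appended element
def pvDedupSorted (xs : List String) : List String :=
  xs.foldl (fun out x => if out = [] ∨ out.getLast? ≠ some x then out ++ [x] else out) []

-- the two-pointer merge loop, as structural recursion on the two remaining suffixes
def pvMerge : List String → List String → List String × List String
  | [], b => ([], b)
  | x :: a, [] => (x :: a, [])
  | x :: a, y :: b =>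
    if x < y then
      let r := pvMerge a (y :: b)
      (x :: r.1, r.2)
    else if y < x then
      let r := pvMerge (x :: a) b
      (r.1, y :: r.2)
    else
      pvMerge a b
termination_by a b => a.length + b.length

def exclusive_products_alt (inventory1 : List String) (inventory2 : List String) : List String × List String :=
  let a := pvDedupSorted (PySem.List.sorted (inventory1.map PySem.Str.upper) (fun x => x) false)
  let b := pvDedupSorted (PySem.List.sorted (inventory2.map PySem.Str.upper) (fun x => x) false)
  pvMerge a b

-- ===== PRECONDITION & SPEC =====
def Spec_exclusive_products (inventory1 : List String) (inventory2 : List String) (out : List String × List String) : Prop := out = exclusive_products_alt inventory1 inventory2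
instance (inventory1 : List String) (inventory2 : List String) (out : List String × List String) : Decidable (Spec_exclusive_products inventory1 inventory2 out) := by unfold Spec_exclusive_products; infer_instance

-- ===== CLAIM (what is proved, stated in full; the proofs are below) =====
def Claim_equal_exclusive_products : Prop := ∀ (inventory1 : List String) (inventory2 : List String), Dom_exclusive_products inventory1 inventory2 → Spec_exclusive_products inventory1 inventory2 (exclusive_products inventory1 inventory2)

-- ===== LEMMAS AND PROOFS =====

-- recursive characterisation of the dedup fold (l = last element appended so far)
def pvDR : List String → Option String → List String
  | [], _ => []
  | x :: xs, l => if l = some x then pvDR xs l else x :: pvDR xs (some x)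

theorem pvDedup_foldl (xs acc : List String) :
    xs.foldl (fun out x => if out = [] ∨ out.getLast? ≠ some x then out ++ [x] else out) acc
      = acc ++ pvDR xs acc.getLast? := by
  induction xs generalizing acc with
  | nil => simp [pvDR]
  | cons x xs ih =>
    simp only [List.foldl_cons, pvDR]
    by_cases h : acc.getLast? = some x
    · have hne : acc ≠ [] := by intro e; rw [e] at h; simp at h
      rw [if_neg (by simp [hne, h]), if_pos h, ih]
    · rw [if_pos (Or.inr h), if_neg h, ih]
      simp

theorem pvDR_spec (xs : List String) (hs : xs.Pairwise (· ≤ ·)) (l : Option String)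
    (hl : ∀ v, l = some v → ∀ y ∈ xs, v ≤ y) :
    (∀ x, x ∈ pvDR xs l ↔ x ∈ xs ∧ l ≠ some x) ∧ (pvDR xs l).Pairwise (· < ·) := by
  induction xs generalizing l with
  | nil => simp [pvDR]
  | cons x xs ih =>
    have hx : ∀ y ∈ xs, x ≤ y := fun y hy => List.rel_of_pairwise_cons hs hy
    have hs' : xs.Pairwise (· ≤ ·) := hs.of_cons
    by_cases h : l = some x
    · have ⟨m, p⟩ := ih hs' l (fun v hv y hy => hl v hv y (List.mem_cons_of_mem _ hy))
      rw [pvDR, if_pos h]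
      refine ⟨fun z => ?_, p⟩
      rw [m z]
      constructor
      · rintro ⟨hz, hnz⟩; exact ⟨List.mem_cons_of_mem _ hz, hnz⟩
      · rintro ⟨hz, hnz⟩
        rcases List.mem_cons.mp hz with rfl | hz
        · exact absurd h hnz
        · exact ⟨hz, hnz⟩
    · have ⟨m, p⟩ := ih hs' (some x) (fun v hv y hy => by cases hv; exact hx y hy)
      rw [pvDR, if_neg h]
      constructor
      · intro z
        constructor
        · intro hz
          rcases List.mem_cons.mp hz with rfl | hz
          · exact ⟨List.mem_cons_self, h⟩
          · obtain ⟨hz', hne⟩ := (m z).mp hz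
            refine ⟨List.mem_cons_of_mem _ hz', fun e => ?_⟩
            have h1 : z ≤ x := hl z e x List.mem_cons_self
            have h2 : x ≤ z := hx z hz'
            have hq : x = z := le_antisymm h2 h1
            exact h (by rw [hq]; exact e)
        · rintro ⟨hz, hne⟩
          rcases List.mem_cons.mp hz with rfl | hz
          · exact List.mem_cons_self
          · by_cases hzx : z = x
            · subst hzx; exact List.mem_cons_self
            · exact List.mem_cons_of_mem _ ((m z).mpr ⟨hz, fun e => hzx (Option.some.inj e).symm⟩)
      · refine List.Pairwise.cons (fun z hz => ?_) p
        obtain ⟨hz', hne⟩ := (m z).mp hz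
        exact lt_of_le_of_ne (hx z hz') (fun e => hne (by rw [e]))

-- a head not occurring in the other list is kept by the filter
theorem pvFilter_keep (w : String) (l m : List String) (hw : w ∉ m) :
    (w :: l).filter (fun z => decide (z ∉ m)) = w :: l.filter (fun z => decide (z ∉ m)) := by
  rw [List.filter_cons, if_pos (by simpa using hw)]

-- if no element of l equals w, the filter against (w :: m) equals the filter against m
theorem pvFilter_skip (w : String) (l m : List String) (h : ∀ z ∈ l, z ≠ w) :
    l.filter (fun z => decide (z ∉ w :: m)) = l.filter (fun z => decide (z ∉ m)) := by
  refine List.filter_congr fun z hz => ?_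
  simp [List.mem_cons, h z hz]

theorem pvMerge_eq (a b : List String) (ha : a.Pairwise (· < ·)) (hb : b.Pairwise (· < ·)) :
    pvMerge a b = (a.filter (fun x => decide (x ∉ b)), b.filter (fun y => decide (y ∉ a))) := by
  induction a, b using pvMerge.induct with
  | case1 b => simp [pvMerge]
  | case2 x a => simp [pvMerge]
  | case3 x a y b hlt ih =>
    have hyb : ∀ z ∈ y :: b, x < z := by
      intro z hz
      rcases List.mem_cons.mp hz with rfl | hz
      · exact hlt
      · exact hlt.trans (List.rel_of_pairwise_cons hb hz)
    rw [pvMerge, if_pos hlt, ih ha.of_cons hb,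
      pvFilter_keep x a (y :: b) (fun hm => lt_irrefl x (hyb x hm)),
      pvFilter_skip x (y :: b) a (fun z hz e => lt_irrefl x (e ▸ hyb z hz))]
  | case4 x a y b hlt1 hlt2 ih =>
    have hxa : ∀ z ∈ x :: a, y < z := by
      intro z hz
      rcases List.mem_cons.mp hz with rfl | hz
      · exact hlt2
      · exact hlt2.trans (List.rel_of_pairwise_cons ha hz)
    rw [pvMerge, if_neg hlt1, if_pos hlt2, ih ha hb.of_cons,
      pvFilter_keep y b (x :: a) (fun hm => lt_irrefl y (hxa y hm)),
      pvFilter_skip y (x :: a) b (fun z hz e => lt_irrefl y (e ▸ hxa z hz))]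
  | case5 x a y b hlt1 hlt2 ih =>
    have hxy : x = y := le_antisymm (not_lt.mp hlt2) (not_lt.mp hlt1)
    subst hxy
    have hda : ∀ z ∈ a, z ≠ x := fun z hz e => lt_irrefl x (e ▸ List.rel_of_pairwise_cons ha hz)
    have hdb : ∀ z ∈ b, z ≠ x := fun z hz e => lt_irrefl x (e ▸ List.rel_of_pairwise_cons hb hz)
    rw [pvMerge, if_neg hlt1, if_neg hlt2, ih ha.of_cons hb.of_cons]
    have h1 : (x :: a).filter (fun z => decide (z ∉ x :: b)) = a.filter (fun z => decide (z ∉ b)) := by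
      rw [List.filter_cons, if_neg (by simp), pvFilter_skip x a b hda]
    have h2 : (x :: b).filter (fun z => decide (z ∉ x :: a)) = b.filter (fun z => decide (z ∉ a)) := by
      rw [List.filter_cons, if_neg (by simp), pvFilter_skip x b a hdb]
    rw [h1, h2]

-- a deduped sorted list: membership = the original list's, and strictly increasing
theorem pvDedup_sorted_spec (u : List String) :
    (∀ x, x ∈ pvDedupSorted (PySem.List.sorted u (fun x => x) false) ↔ x ∈ u) ∧
      (pvDedupSorted (PySem.List.sorted u (fun x => x) false)).Pairwise (· < ·) := by
  have hs : (PySem.List.sorted u (fun x => x) false).Pairwise (· ≤ ·) := by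
    have := PySem.List.sorted_pairwise u (fun x => x)
    simpa using this
  have hfold := pvDedup_foldl (PySem.List.sorted u (fun x => x) false) []
  have ⟨m, p⟩ := pvDR_spec (PySem.List.sorted u (fun x => x) false) hs none
    (fun v hv => by cases hv)
  unfold pvDedupSorted
  rw [hfold]
  simp only [List.nil_append, List.getLast?_nil]
  refine ⟨fun x => ?_, p⟩
  rw [m x]
  simp [PySem.List.mem_sorted]

theorem exclusive_products_eq_alt (inv1 inv2 : List String) :
    exclusive_products inv1 inv2 = exclusive_products_alt inv1 inv2 := by
  have efold : ∀ l : List String,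
      l.foldl (fun s i => PySem.Set.add s (PySem.Str.upper i)) PySem.Set.empty
        = PySem.Set.ofList (l.map PySem.Str.upper) := by
    intro l; rw [PySem.Set.ofList_eq_foldl, List.foldl_map]; rfl
  simp only [exclusive_products, exclusive_products_alt, efold]
  set u1 := inv1.map PySem.Str.upper with hu1
  set u2 := inv2.map PySem.Str.upper with hu2
  set a := pvDedupSorted (PySem.List.sorted u1 (fun x => x) false) with hadef
  set b := pvDedupSorted (PySem.List.sorted u2 (fun x => x) false) with hbdef
  have ⟨ma, pa⟩ := pvDedup_sorted_spec u1
  have ⟨mb, pb⟩ := pvDedup_sorted_spec u2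
  rw [← hadef] at ma pa
  rw [← hbdef] at mb pb
  rw [pvMerge_eq a b pa pb]
  have nodup_of_lt : ∀ l : List String, l.Pairwise (· < ·) → l.Nodup := by
    intro l hl; exact hl.imp ne_of_lt
  refine Prod.ext ?_ ?_
  · show PySem.List.sorted (PySem.Set.diff (PySem.Set.ofList u1) (PySem.Set.ofList u2)) (fun x => x) false
      = a.filter (fun x => decide (x ∉ b))
    refine PySem.List.sorted_eq_of_perm_of_pairwise_lt _ _ _ ?_ ?_
    · refine (List.perm_ext_iff_of_nodup
        (List.filter_sublist.nodup (nodup_of_lt a pa))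
        (PySem.Set.nodup_diff _ _ (PySem.Set.nodup_ofList _))).mpr (fun z => ?_)
      rw [List.mem_filter, PySem.Set.mem_diff, PySem.Set.mem_ofList, PySem.Set.mem_ofList,
        ma z, decide_eq_true_eq]
      constructor
      · rintro ⟨h1, h2⟩; exact ⟨h1, fun hm => h2 ((mb z).mpr hm)⟩
      · rintro ⟨h1, h2⟩; exact ⟨h1, fun hm => h2 ((mb z).mp hm)⟩
    · simpa using List.Pairwise.sublist List.filter_sublist pa
  · show PySem.List.sorted (PySem.Set.diff (PySem.Set.ofList u2) (PySem.Set.ofList u1)) (fun x => x) false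
      = b.filter (fun y => decide (y ∉ a))
    refine PySem.List.sorted_eq_of_perm_of_pairwise_lt _ _ _ ?_ ?_
    · refine (List.perm_ext_iff_of_nodup
        (List.filter_sublist.nodup (nodup_of_lt b pb))
        (PySem.Set.nodup_diff _ _ (PySem.Set.nodup_ofList _))).mpr (fun z => ?_)
      rw [List.mem_filter, PySem.Set.mem_diff, PySem.Set.mem_ofList, PySem.Set.mem_ofList,
        mb z, decide_eq_true_eq]
      constructor
      · rintro ⟨h1, h2⟩; exact ⟨h1, fun hm => h2 ((ma z).mpr hm)⟩
      · rintro ⟨h1, h2⟩; exact ⟨h1, fun hm => h2 ((ma z).mp hm)⟩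
    · simpa using List.Pairwise.sublist List.filter_sublist pb

-- ===== VERDICT (by name: the statement is the Claim_ definition above) =====
theorem exclusive_products_spec : Claim_equal_exclusive_products := by
  intro inv1 inv2 _
  exact exclusive_products_eq_alt inv1 inv2
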